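-- pv_equiv track=rewrite | github.com/narisun/ai-eap-sdk | packages/eap-core/src/eap_core/middleware/pii.py | _passes_luhn
-- ===== SOURCE A (Python) =====
-- def _passes_luhn(digits_str: str) -> bool:
--     """Validate a card number using the Luhn algorithm (P1-6).
--
--     Returns True if the digit sequence is a valid Luhn checksum, False
--     otherwise. Used to filter false-positive credit-card regex matches
--     (e.g., 16-digit phone numbers or arbitrary numeric sequences).
--
--     Standard card lengths: 13 (rare), 14, 15 (Amex), 16 (most), 19 (some).
--     Separators (``-``/space) are ignored — pass either the raw match or
--     a normalized digits-only string.
--     """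
--     digits = [int(c) for c in digits_str if c.isdigit()]
--     if len(digits) not in (13, 14, 15, 16, 19):
--         return False
--     checksum = 0
--     for i, d in enumerate(reversed(digits)):
--         if i % 2 == 1:
--             d *= 2
--             if d > 9:
--                 d -= 9
--         checksum += d
--     return checksum % 10 == 0
-- ===== SOURCE B (Python) =====
-- def _passes_luhn(digits_str: str) -> bool:
--     """Luhn check via an online two-accumulator recurrence.
--
--     Process digits left-to-right keeping a pair (a, b):
--       a = checksum of the prefix if its last digit ends up NOT doubled,
--       b = checksum of the prefix if its last digit ends up doubled.
--     Each new digit shifts every previous digit one place further from the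
--     end, which simply swaps the roles: (a, b) = (b + d, a + double(d)).
--     The true last digit is never doubled, so the answer is always a —
--     no reversal, no enumerate, no parity test.
--     """
--     digits = [int(c) for c in digits_str if c.isdigit()]
--     if len(digits) not in (13, 14, 15, 16, 19):
--         return False
--     a = b = 0
--     for d in digits:
--         a, b = b + d, a + (2 * d - 9 if d > 4 else 2 * d)
--     return a % 10 == 0
-- ===== Notes on version B (the rewrite author's own statement) =====
-- stated objective: alternative
-- what changed: Replaces the reversed, enumerate-indexed loop with a parity branch by an online two-accumulator recurrence processed left-to-right: (a,b) = (b+d, a+double(d)), where a/b are the prefix checksums assuming its last digit is not doubled / doubled; the answer is always a, so no reversal, no index and no parity test exist in B.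
import Mathlib
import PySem

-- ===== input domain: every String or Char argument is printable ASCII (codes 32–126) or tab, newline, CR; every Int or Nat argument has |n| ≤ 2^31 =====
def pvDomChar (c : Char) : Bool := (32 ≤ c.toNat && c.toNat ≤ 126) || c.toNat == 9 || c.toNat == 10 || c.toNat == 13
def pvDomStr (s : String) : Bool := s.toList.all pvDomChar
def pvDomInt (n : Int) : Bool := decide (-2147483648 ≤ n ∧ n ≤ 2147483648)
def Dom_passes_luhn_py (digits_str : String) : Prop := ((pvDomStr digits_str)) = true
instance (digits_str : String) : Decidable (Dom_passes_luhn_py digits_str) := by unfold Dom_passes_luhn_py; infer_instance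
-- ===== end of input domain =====

-- B replaces A's reversed, index-parity loop by an online two-accumulator recurrence
-- (a,b) = (b+d, a+double(d)) processed left-to-right (alternative decomposition, same cost).


-- ===== PORT A =====
-- digits = [int(c) for c in digits_str if c.isdigit()]  (identical line in A and B)
-- int(c): c passed the isdigit filter, so ofChars? is always `some`; getD 0 never fires
def pvDigits (s : String) : List Int :=
  (s.toList.filter (fun c => PySem.Chars.isdigit c)).map
    (fun c => (PySem.Int.ofChars? [c]).getD 0)

def passes_luhn_py (digits_str : String) : Bool :=
  let digits := pvDigits digits_str
  if !(([13, 14, 15, 16, 19] : List Int).contains (PySem.List.len digits)) then false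
  else
    let checksum :=
      (PySem.List.enumerate digits.reverse).foldl
        (fun checksum p =>
          let d := p.2
          let d := if PySem.Int.mod p.1 2 == 1 then
              (let d := d * 2; if d > 9 then d - 9 else d)
            else d
          checksum + d) 0
    PySem.Int.mod checksum 10 == 0

-- ===== PORT B =====
def passes_luhn_py_alt (digits_str : String) : Bool :=
  let digits := pvDigits digits_str
  if !(([13, 14, 15, 16, 19] : List Int).contains (PySem.List.len digits)) then false
  else
    -- a, b = b + d, a + (2*d - 9 if d > 4 else 2*d)
    let ab := digits.foldl
      (fun (ab : Int × Int) d =>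
        (ab.2 + d, ab.1 + (if d > 4 then 2 * d - 9 else 2 * d))) (0, 0)
    PySem.Int.mod ab.1 10 == 0

-- ===== PRECONDITION & SPEC =====
def Spec_passes_luhn_py (digits_str : String) (out : Bool) : Prop := out = passes_luhn_py_alt digits_str
instance (digits_str : String) (out : Bool) : Decidable (Spec_passes_luhn_py digits_str out) := by unfold Spec_passes_luhn_py; infer_instance

-- ===== CLAIM (what is proved, stated in full; the proofs are below) =====
def Claim_equal_passes_luhn_py : Prop := ∀ (digits_str : String), Dom_passes_luhn_py digits_str → Spec_passes_luhn_py digits_str (passes_luhn_py digits_str)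

-- ===== LEMMAS AND PROOFS =====

-- doubled value of one digit, as A computes it
def pvDouble (d : Int) : Int := if d * 2 > 9 then d * 2 - 9 else d * 2

-- Luhn sum of a list, doubling positions at odd distance from the end
def pvLuhnF : List Int → Int
  | [] => 0
  | a :: t => (if t.length % 2 == 1 then pvDouble a else a) + pvLuhnF t

-- Luhn sum doubling positions at EVEN distance from the end (B's second accumulator)
def pvLuhnG : List Int → Int
  | [] => 0
  | a :: t => (if t.length % 2 == 1 then a else pvDouble a) + pvLuhnG t

-- Luhn sum of a (reversed) list starting at index k, doubling odd indices (A's loop)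
def pvLuhnIdx : List Int → Nat → Int
  | [], _ => 0
  | a :: t, k => (if k % 2 == 1 then pvDouble a else a) + pvLuhnIdx t (k + 1)

theorem pvMod2_natCast (k : Nat) : PySem.Int.mod (k : Int) 2 = ((k % 2 : Nat) : Int) := by
  rw [PySem.Int.mod_eq_emod_of_pos (by omega : (0:Int) < 2)]
  omega

theorem pvFoldA (r : List Int) : ∀ (k : Nat) (acc : Int),
    (PySem.List.enumerate r (k : Int)).foldl
      (fun checksum p =>
        let d := p.2
        let d := if PySem.Int.mod p.1 2 == 1 then
            (let d := d * 2; if d > 9 then d - 9 else d)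
          else d
        checksum + d) acc = acc + pvLuhnIdx r k := by
  induction r with
  | nil => intro k acc; simp [PySem.List.enumerate_nil, pvLuhnIdx]
  | cons a t ih =>
    intro k acc
    rw [PySem.List.enumerate_cons]
    have hcast : ((k : Int) + 1) = ((k + 1 : Nat) : Int) := by push_cast; ring
    simp only [List.foldl_cons, hcast, ih]
    have hcond : (PySem.Int.mod (k : Int) 2 == 1) = (k % 2 == 1) := by
      rw [pvMod2_natCast]
      rcases Nat.mod_two_eq_zero_or_one k with h | h <;> simp [h]
    simp only [pvLuhnIdx, pvDouble, hcond]
    ring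

theorem pvLuhnIdx_append (l : List Int) (a : Int) : ∀ k,
    pvLuhnIdx (l ++ [a]) k =
      pvLuhnIdx l k + (if (k + l.length) % 2 == 1 then pvDouble a else a) := by
  induction l with
  | nil => intro k; simp [pvLuhnIdx]
  | cons b t ih =>
    intro k
    simp only [List.cons_append, pvLuhnIdx, ih]
    have : k + 1 + t.length = k + (t.length + 1) := by omega
    rw [this]
    simp [List.length_cons]
    ring

theorem pvLuhnIdx_rev (l : List Int) : pvLuhnIdx l.reverse 0 = pvLuhnF l := by
  induction l with
  | nil => rfl
  | cons a t ih =>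
    rw [List.reverse_cons, pvLuhnIdx_append, ih]
    simp only [List.length_reverse, pvLuhnF, Nat.zero_add]
    ring

-- A's in-loop arithmetic on a digit equals pvDouble via 2d > 9 ↔ d > 4 over Int
theorem pvStepDouble (d : Int) : (if d > 4 then 2 * d - 9 else 2 * d) = pvDouble d := by
  unfold pvDouble
  rcases lt_or_ge (4 : Int) d with h | h <;> simp [h] <;> omega

-- B's fold invariant: from state (a,b) the fold returns the pair of Luhn sums,
-- with the starting state's components swapped in when the list length is odd
theorem pvFoldB (l : List Int) : ∀ (a b : Int),
    l.foldl (fun (ab : Int × Int) d =>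
        (ab.2 + d, ab.1 + (if d > 4 then 2 * d - 9 else 2 * d))) (a, b)
      = (pvLuhnF l + (if l.length % 2 == 1 then b else a),
         pvLuhnG l + (if l.length % 2 == 1 then a else b)) := by
  induction l with
  | nil => intro a b; simp [pvLuhnF, pvLuhnG]
  | cons d t ih =>
    intro a b
    rw [List.foldl_cons, ih]
    simp only [pvLuhnF, pvLuhnG, pvStepDouble, List.length_cons]
    rcases Nat.mod_two_eq_zero_or_one t.length with h | h <;>
      simp [h, Nat.add_mod, Prod.ext_iff] <;> constructor <;> ring

-- ===== VERDICT (by name: the statement is the Claim_ definition above) =====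
theorem passes_luhn_py_spec : Claim_equal_passes_luhn_py := by
  intro s _
  unfold Spec_passes_luhn_py passes_luhn_py passes_luhn_py_alt
  by_cases hg : (([13, 14, 15, 16, 19] : List Int).contains (PySem.List.len (pvDigits s))) = true
  · simp only [hg, Bool.not_true, Bool.false_eq_true, if_false]
    have hA := pvFoldA (pvDigits s).reverse 0 0
    have hB := pvFoldB (pvDigits s) 0 0
    simp only [Nat.cast_zero] at hA
    rw [hA, hB, pvLuhnIdx_rev]
    rcases Nat.mod_two_eq_zero_or_one (pvDigits s).length with h | h <;> simp [h]
  · have hg' : (([13, 14, 15, 16, 19] : List Int).contains (PySem.List.len (pvDigits s))) = false := by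
      simpa using hg
    simp only [hg', Bool.not_false, if_pos]
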